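-- pv_equiv track=rewrite | github.com/6GeniusTurtle9/TIL | 공부/20200130(more).py | bloodtype
-- ===== SOURCE A (Python) =====
-- def bloodtype(bloods):
--     result = {}
--     abo_type = ["A","B","O","AB"]
--     rh_type = ["-","+"]
--     for blood in bloods:
--         if blood[:-1] in abo_type:
--             if blood[:-1] not in result:
--                 result[blood[:-1]] = 1
--             else:
--                 result[blood[:-1]] += 1
--         if blood[-1] in rh_type:
--             if blood[-1] not in result:
--                 result[blood[-1]] = 1
--             else:
--                 result[blood[-1]] += 1
--     return result
-- ===== SOURCE B (Python) =====
-- def bloodtype(bloods):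
--     abo_type = ["A", "B", "O", "AB"]
--     rh_type = ["-", "+"]
--     keys = []
--     for blood in bloods:
--         head = blood[:-1]
--         if head in abo_type:
--             keys.append(head)
--         tail = blood[-1]
--         if tail in rh_type:
--             keys.append(tail)
--     order = []
--     for k in keys:
--         if k not in order:
--             order.append(k)
--     return {k: keys.count(k) for k in order}
-- ===== Notes on version B (the rewrite author's own statement) =====
-- stated objective: alternative
-- what changed: A does one pass updating a dict counter in place for both the ABO part and the Rh sign of each string; B instead flattens the input into a stream of recognized keys, dedupes that stream in first-occurrence order, and builds the result by counting each distinct key with list.count.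
-- outside the precondition, e.g. on bloodtype(['']): A raises IndexError, B raises IndexError
import Mathlib
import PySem

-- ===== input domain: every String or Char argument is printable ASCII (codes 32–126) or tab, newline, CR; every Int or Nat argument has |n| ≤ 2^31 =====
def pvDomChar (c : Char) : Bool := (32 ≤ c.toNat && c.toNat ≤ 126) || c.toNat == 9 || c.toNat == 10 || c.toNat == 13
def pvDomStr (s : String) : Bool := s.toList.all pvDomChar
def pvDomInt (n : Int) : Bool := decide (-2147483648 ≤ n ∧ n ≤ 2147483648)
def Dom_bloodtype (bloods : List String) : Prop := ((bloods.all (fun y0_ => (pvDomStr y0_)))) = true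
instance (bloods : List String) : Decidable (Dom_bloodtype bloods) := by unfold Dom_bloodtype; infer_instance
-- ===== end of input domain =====

-- B replaces A's single interleaved dict-counting pass with a different decomposition: flatten to a
-- key stream, dedupe it, then count each key with list.count (objective: alternative, same cost).

-- ===== PORT A =====
-- literal port of A: one pass, a dict counter updated in place for the ABO part and the Rh sign
def bloodtype (bloods : List String) : List (String × Int) :=
  (bloods.foldl (fun (result : PySem.Dict String Int) blood =>
    let abo_type : List String := ["A", "B", "O", "AB"]
    let rh_type : List String := ["-", "+"]
    let h := PySem.Str.slice blood none (some (-1))          -- blood[:-1]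
    let result :=
      if h ∈ abo_type then
        if ¬ result.contains h then result.insert h 1
        else result.insert h (result.getD h 0 + 1)           -- result[blood[:-1]] += 1
      else result
    match PySem.Str.pyGet? blood (-1) with                   -- blood[-1]; none = IndexError, excluded by Pre_
    | none => result
    | some c =>
      let t := String.ofList [c]
      if t ∈ rh_type then
        if ¬ result.contains t then result.insert t 1
        else result.insert t (result.getD t 0 + 1)
      else result) PySem.Dict.empty).items

-- ===== PORT B =====
-- literal port of B (Source B): build the key stream, dedupe it in first-occurrence order, count per key
def bloodtype_alt (bloods : List String) : List (String × Int) :=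
  let keys := bloods.foldl (fun (ks : List String) blood =>
    let head := PySem.Str.slice blood none (some (-1))       -- blood[:-1]
    let ks := if head ∈ (["A", "B", "O", "AB"] : List String) then ks ++ [head] else ks
    match PySem.Str.pyGet? blood (-1) with                   -- blood[-1]; none = IndexError, excluded by Pre_
    | none => ks
    | some c =>
      let tail := String.ofList [c]
      if tail ∈ (["-", "+"] : List String) then ks ++ [tail] else ks) []
  let order := PySem.Set.ofList keys                         -- 'if k not in order: order.append(k)'
  order.map (fun k => (k, (keys.count k : Int)))             -- {k: keys.count(k) for k in order}

-- ===== PRECONDITION & SPEC =====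
-- Pre_ excludes lists containing the empty string, on which Python A (and B) raise IndexError at blood[-1].
def Pre_bloodtype (bloods : List String) : Prop := ∀ b ∈ bloods, b ≠ ""
instance (bloods : List String) : Decidable (Pre_bloodtype bloods) := by unfold Pre_bloodtype; infer_instance
def pvWitness_bloodtype : List String := ["A+", "O-", "AB+", "A+", "B-"]
def Spec_bloodtype (bloods : List String) (out : List (String × Int)) : Prop := out = bloodtype_alt bloods
instance (bloods : List String) (out : List (String × Int)) : Decidable (Spec_bloodtype bloods out) := by unfold Spec_bloodtype; infer_instance

-- ===== CLAIM (what is proved, stated in full; the proofs are below) =====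
def Claim_equal_bloodtype : Prop := ∀ (bloods : List String), Dom_bloodtype bloods → Pre_bloodtype bloods → Spec_bloodtype bloods (bloodtype bloods)

-- ===== LEMMAS AND PROOFS =====

-- the per-element key stream both programs extract from a blood string
def pvKeyOf (blood : String) : List String :=
  (if PySem.Str.slice blood none (some (-1)) ∈ (["A", "B", "O", "AB"] : List String)
   then [PySem.Str.slice blood none (some (-1))] else []) ++
  (match PySem.Str.pyGet? blood (-1) with
   | none => []
   | some c => if String.ofList [c] ∈ (["-", "+"] : List String) then [String.ofList [c]] else [])

-- A's per-element step is the counter step folded over that element's key stream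
theorem pvA_step (d : PySem.Dict String Int) (blood : String) :
    (let abo_type : List String := ["A", "B", "O", "AB"]
     let rh_type : List String := ["-", "+"]
     let h := PySem.Str.slice blood none (some (-1))
     let d1 :=
       if h ∈ abo_type then
         if ¬ d.contains h then d.insert h 1
         else d.insert h (d.getD h 0 + 1)
       else d
     match PySem.Str.pyGet? blood (-1) with
     | none => d1
     | some c =>
       let t := String.ofList [c]
       if t ∈ rh_type then
         if ¬ d1.contains t then d1.insert t 1
         else d1.insert t (d1.getD t 0 + 1)
       else d1) =
    (pvKeyOf blood).foldl (fun d k => d.insert k (d.getD k 0 + 1)) d := by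
  have step1 : ∀ (d : PySem.Dict String Int) (k : String),
      (if d.contains k = false then d.insert k 1 else d.insert k (d.getD k 0 + 1)) =
      d.insert k (d.getD k 0 + 1) := by
    intro d k
    by_cases hc : d.contains k = false
    · simp [hc, PySem.Dict.getD_of_not_contains d 0 hc]
    · simp [hc]
  simp only [pvKeyOf, List.foldl_append]
  cases hg : PySem.Str.pyGet? blood (-1) with
  | none =>
    by_cases h1 : PySem.Str.slice blood none (some (-1)) ∈ (["A", "B", "O", "AB"] : List String) <;>
      simp [h1, step1]
  | some c =>
    by_cases h1 : PySem.Str.slice blood none (some (-1)) ∈ (["A", "B", "O", "AB"] : List String) <;>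
      by_cases h2 : String.ofList [c] ∈ (["-", "+"] : List String) <;>
        simp [h1, h2, step1]

-- B's per-element step appends that same key stream
theorem pvB_step (ks : List String) (blood : String) :
    (let head := PySem.Str.slice blood none (some (-1))
     let ks1 := if head ∈ (["A", "B", "O", "AB"] : List String) then ks ++ [head] else ks
     match PySem.Str.pyGet? blood (-1) with
     | none => ks1
     | some c =>
       let tail := String.ofList [c]
       if tail ∈ (["-", "+"] : List String) then ks1 ++ [tail] else ks1) =
    ks ++ pvKeyOf blood := by
  simp only [pvKeyOf]
  cases hg : PySem.Str.pyGet? blood (-1) with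
  | none =>
    by_cases h1 : PySem.Str.slice blood none (some (-1)) ∈ (["A", "B", "O", "AB"] : List String) <;>
      simp [h1]
  | some c =>
    by_cases h1 : PySem.Str.slice blood none (some (-1)) ∈ (["A", "B", "O", "AB"] : List String) <;>
      by_cases h2 : String.ofList [c] ∈ (["-", "+"] : List String) <;>
        simp [h1, h2]

-- ===== VERDICT (by name: the statement is the Claim_ definition above) =====
theorem bloodtype_spec : Claim_equal_bloodtype := by
  intro bloods _ _
  unfold Spec_bloodtype bloodtype bloodtype_alt
  have hA : bloods.foldl (fun (result : PySem.Dict String Int) blood =>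
      let abo_type : List String := ["A", "B", "O", "AB"]
      let rh_type : List String := ["-", "+"]
      let h := PySem.Str.slice blood none (some (-1))
      let result :=
        if h ∈ abo_type then
          if ¬ result.contains h then result.insert h 1
          else result.insert h (result.getD h 0 + 1)
        else result
      match PySem.Str.pyGet? blood (-1) with
      | none => result
      | some c =>
        let t := String.ofList [c]
        if t ∈ rh_type then
          if ¬ result.contains t then result.insert t 1
          else result.insert t (result.getD t 0 + 1)
        else result) PySem.Dict.empty
      = PySem.Dict.counter (bloods.flatMap pvKeyOf) := by
    rw [← PySem.Dict.foldl_insert_getD_add_one_eq_counter, List.foldl_flatMap]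
    congr 1
    funext d b
    exact pvA_step d b
  have hB : bloods.foldl (fun (ks : List String) blood =>
      let head := PySem.Str.slice blood none (some (-1))
      let ks := if head ∈ (["A", "B", "O", "AB"] : List String) then ks ++ [head] else ks
      match PySem.Str.pyGet? blood (-1) with
      | none => ks
      | some c =>
        let tail := String.ofList [c]
        if tail ∈ (["-", "+"] : List String) then ks ++ [tail] else ks) []
      = bloods.flatMap pvKeyOf := by
    conv_rhs => rw [← List.nil_append (List.flatMap pvKeyOf bloods)]
    rw [← PySem.List.foldl_append_eq_flatMap pvKeyOf bloods []]
    congr 1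
    funext ks b
    exact pvB_step ks b
  simp only [hA, hB, PySem.Dict.items_counter]
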